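-- pv_equiv track=rewrite | github.com/d-genk/vandyvision | write_metadata.py | _compute_headers
-- ===== SOURCE A (Python) =====
-- from typing import Dict, List, Any, Tuple
--
-- def _compute_headers(
--     existing_headers: List[str],
--     new_records: List[Dict[str, Any]],
--     add_missing_columns: bool,
-- ) -> List[str]:
--     """
--     Merge existing headers with keys from new_records.
--     Preserves existing order; appends new columns in first-seen order.
--     """
--     headers = list(existing_headers)
--     if add_missing_columns:
--         seen = set(headers)
--         for rec in new_records:
--             for k in rec.keys():
--                 if k not in seen:
--                     headers.append(k)
--                     seen.add(k)
--     return headers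
-- ===== SOURCE B (Python) =====
-- from typing import Dict, List, Any, Tuple
--
-- def _compute_headers(
--     existing_headers: List[str],
--     new_records: List[Dict[str, Any]],
--     add_missing_columns: bool,
-- ) -> List[str]:
--     # B: divide-and-conquer merge. The ordered-dedup key list of a block of
--     # records is obtained by recursively merging the key lists of its two
--     # halves (left kept verbatim, right filtered against the left); the
--     # result is then appended to the existing headers (kept verbatim,
--     # duplicates and all), filtered against them.
--     headers = list(existing_headers)
--     if not add_missing_columns:
--         return headers
--
--     def merge(records):
--         if not records:
--             return []
--         if len(records) == 1:
--             return list(records[0].keys())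
--         mid = len(records) // 2
--         left = merge(records[:mid])
--         right = merge(records[mid:])
--         have = set(left)
--         return left + [k for k in right if k not in have]
--
--     have = set(headers)
--     return headers + [k for k in merge(new_records) if k not in have]
-- ===== Notes on version B (the rewrite author's own statement) =====
-- stated objective: alternative
-- what changed: A streams every key once through a growing seen-set; B computes the ordered-dedup key list by divide-and-conquer on the records (recursively merge the two halves' key lists, filtering the right half against a set of the left) and finally appends that list filtered against the existing headers.
import Mathlib
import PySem

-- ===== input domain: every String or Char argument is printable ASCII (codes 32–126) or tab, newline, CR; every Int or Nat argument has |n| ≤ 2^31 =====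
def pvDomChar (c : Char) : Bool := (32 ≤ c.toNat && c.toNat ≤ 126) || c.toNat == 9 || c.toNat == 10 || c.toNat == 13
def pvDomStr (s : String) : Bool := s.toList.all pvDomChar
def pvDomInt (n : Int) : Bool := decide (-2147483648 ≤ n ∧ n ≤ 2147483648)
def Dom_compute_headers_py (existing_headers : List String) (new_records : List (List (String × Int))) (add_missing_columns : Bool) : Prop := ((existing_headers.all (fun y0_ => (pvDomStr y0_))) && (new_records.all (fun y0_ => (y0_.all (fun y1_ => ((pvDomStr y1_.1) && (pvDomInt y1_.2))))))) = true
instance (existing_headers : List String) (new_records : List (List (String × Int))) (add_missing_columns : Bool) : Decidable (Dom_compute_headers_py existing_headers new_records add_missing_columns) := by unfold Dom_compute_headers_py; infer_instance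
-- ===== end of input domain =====

-- B replaces A's single streaming pass with a growing seen-set by a divide-and-conquer
-- merge of the records' key lists (objective: alternative; similar cost).

-- ===== PORT A =====
-- A: copy headers; if add_missing_columns, seed seen = set(headers) and walk each record's
-- keys, appending unseen keys and adding them to seen.
def compute_headers_py (existing_headers : List String) (new_records : List (List (String × Int))) (add_missing_columns : Bool) : List String :=
  let headers := existing_headers
  if add_missing_columns then
    let seen : PySem.Set String := PySem.Set.ofList headers
    (List.foldl
      (fun (st : List String × PySem.Set String) rec =>
        List.foldl
          (fun (st : List String × PySem.Set String) k =>
            if PySem.Set.contains st.2 k then st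
            else (st.1 ++ [k], PySem.Set.add st.2 k))
          st ((PySem.Dict.ofList rec).keys))
      (headers, seen) new_records).1
  else headers

-- ===== PORT B =====
-- B's helper merge(records): ordered-dedup key list of a block of records by
-- divide and conquer (records[:mid] / records[mid:] are nonneg in-range slices = take/drop).
def pvMergeRecs (recs : List (List (String × Int))) : List String :=
  match recs with
  | [] => []
  | [r] => (PySem.Dict.ofList r).keys
  | a :: b :: t =>
    let recs := a :: b :: t
    let mid := recs.length / 2
    let left := pvMergeRecs (recs.take mid)
    let right := pvMergeRecs (recs.drop mid)
    let have_ : PySem.Set String := PySem.Set.ofList left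
    left ++ right.filter (fun k => !(PySem.Set.contains have_ k))
termination_by recs.length
decreasing_by
  · simp [List.length_take]; omega
  · simp [List.length_drop]; omega

-- B: headers verbatim; if add_missing_columns, append merge(new_records) filtered
-- against set(headers).
def compute_headers_py_alt (existing_headers : List String) (new_records : List (List (String × Int))) (add_missing_columns : Bool) : List String :=
  let headers := existing_headers
  if !add_missing_columns then headers
  else
    let have_ : PySem.Set String := PySem.Set.ofList headers
    headers ++ (pvMergeRecs new_records).filter (fun k => !(PySem.Set.contains have_ k))

-- ===== PRECONDITION & SPEC =====
def Spec_compute_headers_py (existing_headers : List String) (new_records : List (List (String × Int))) (add_missing_columns : Bool) (out : List String) : Prop := out = compute_headers_py_alt existing_headers new_records add_missing_columns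
instance (existing_headers : List String) (new_records : List (List (String × Int))) (add_missing_columns : Bool) (out : List String) : Decidable (Spec_compute_headers_py existing_headers new_records add_missing_columns out) := by unfold Spec_compute_headers_py; infer_instance

-- ===== CLAIM (what is proved, stated in full; the proofs are below) =====
def Claim_equal_compute_headers_py : Prop := ∀ (existing_headers : List String) (new_records : List (List (String × Int))) (add_missing_columns : Bool), Dom_compute_headers_py existing_headers new_records add_missing_columns → Spec_compute_headers_py existing_headers new_records add_missing_columns (compute_headers_py existing_headers new_records add_missing_columns)

-- ===== LEMMAS AND PROOFS =====

-- The "new columns actually appended" list, as a function of the key stream and the seen set.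
def pvPick : List String → PySem.Set String → List String
  | [], _ => []
  | k :: ks, s =>
    if PySem.Set.contains s k then pvPick ks s else k :: pvPick ks (PySem.Set.add s k)

-- A's inner loop body.
def pvStep (st : List String × PySem.Set String) (k : String) : List String × PySem.Set String :=
  if PySem.Set.contains st.2 k then st else (st.1 ++ [k], PySem.Set.add st.2 k)

lemma pvFoldA (ks : List String) (h : List String) (s : PySem.Set String) :
    (List.foldl pvStep (h, s) ks).1 = h ++ pvPick ks s := by
  induction ks generalizing h s with
  | nil => simp [pvPick]
  | cons k ks ih =>
    by_cases hc : k ∈ s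
    · simp [pvStep, pvPick, PySem.Set.contains, hc, ih]
    · simp [pvStep, pvPick, PySem.Set.contains, hc, ih]

lemma pvMem_add (s : PySem.Set String) (k x : String) :
    x ∈ PySem.Set.add s k ↔ x ∈ s ∨ x = k := PySem.Set.mem_add s k x

lemma pvMem_pick (ks : List String) (s : PySem.Set String) (x : String) :
    x ∈ pvPick ks s ↔ x ∈ ks ∧ x ∉ s := by
  induction ks generalizing s with
  | nil => simp [pvPick]
  | cons k ks ih =>
    by_cases hc : k ∈ s
    · rw [pvPick, if_pos (by simpa [PySem.Set.contains, List.contains_iff_mem] using hc)]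
      rw [ih]; simp only [List.mem_cons]
      constructor
      · rintro ⟨h1, h2⟩; exact ⟨Or.inr h1, h2⟩
      · rintro ⟨h1 | h1, h2⟩
        · exact absurd (h1 ▸ hc) h2
        · exact ⟨h1, h2⟩
    · rw [pvPick, if_neg (by simpa [PySem.Set.contains, List.contains_iff_mem] using hc)]
      simp only [List.mem_cons, ih, pvMem_add, not_or]
      constructor
      · rintro (rfl | ⟨h1, h2, h3⟩)
        · exact ⟨Or.inl rfl, hc⟩
        · exact ⟨Or.inr h1, h2⟩
      · rintro ⟨rfl | h1, h2⟩
        · exact Or.inl rfl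
        · by_cases hx : x = k
          · exact Or.inl hx
          · exact Or.inr ⟨h1, h2, hx⟩

lemma pvMem_foldl_add (a : List String) (s : PySem.Set String) (x : String) :
    x ∈ List.foldl PySem.Set.add s a ↔ x ∈ s ∨ x ∈ a := by
  induction a generalizing s with
  | nil => simp
  | cons k ks ih => simp [ih]; tauto

lemma pvPick_append (a b : List String) (s : PySem.Set String) :
    pvPick (a ++ b) s = pvPick a s ++ pvPick b (List.foldl PySem.Set.add s a) := by
  induction a generalizing s with
  | nil => simp [pvPick]
  | cons k ks ih =>
    by_cases hc : k ∈ s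
    · simp only [List.cons_append, pvPick, PySem.Set.contains, List.contains_iff_mem,
        ih, List.foldl_cons, PySem.Set.add, if_pos (by simpa [PySem.Set.contains, List.contains_iff_mem] using hc)]
    · simp only [List.cons_append, pvPick, PySem.Set.contains, List.contains_iff_mem,
        ih, List.foldl_cons, PySem.Set.add,
        if_neg (by simpa [PySem.Set.contains, List.contains_iff_mem] using hc)]

lemma pvPick_of_nodup (ks : List String) (s : PySem.Set String)
    (hnd : ks.Nodup) (hs : ∀ x ∈ ks, x ∉ s) : pvPick ks s = ks := by
  induction ks generalizing s with
  | nil => rfl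
  | cons k ks ih =>
    have hk : k ∉ s := hs k List.mem_cons_self
    rw [pvPick, if_neg (by simpa [PySem.Set.contains, List.contains_iff_mem] using hk)]
    refine congrArg (k :: ·) (ih (PySem.Set.add s k) (List.nodup_cons.mp hnd).2 ?_)
    intro x hx hmem
    rcases (pvMem_add s k x).mp hmem with h | h
    · exact hs x (List.mem_cons_of_mem _ hx) h
    · exact (List.nodup_cons.mp hnd).1 (h ▸ hx)

lemma pvFilterPick (ks : List String) (s : PySem.Set String) :
    ∀ (t s' : PySem.Set String),
      (∀ x, x ∈ s' ↔ (x ∈ t ∨ x ∈ s)) →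
      (pvPick ks t).filter (fun k => !(PySem.Set.contains s k)) = pvPick ks s' := by
  induction ks with
  | nil => intro t s' _; simp [pvPick]
  | cons k ks ih =>
    intro t s' hmem
    by_cases ht : k ∈ t
    · have hs' : k ∈ s' := (hmem k).2 (Or.inl ht)
      simp only [pvPick, PySem.Set.contains, List.contains_iff_mem,
        if_pos ht, if_pos hs']
      exact ih t s' hmem
    · by_cases hs : k ∈ s
      · have hs' : k ∈ s' := (hmem k).2 (Or.inr hs)
        simp only [pvPick, PySem.Set.contains, List.contains_iff_mem,
          if_neg ht, if_pos hs']
        rw [List.filter_cons_of_neg (by simp [hs])]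
        refine ih (PySem.Set.add t k) s' ?_
        intro x
        rw [hmem, pvMem_add]
        by_cases hx : x = k
        · subst hx; simp [hs]
        · simp [hx]
      · have hs' : k ∉ s' := fun h => ((hmem k).1 h).elim ht hs
        simp only [pvPick, PySem.Set.contains, List.contains_iff_mem,
          if_neg ht, if_neg hs']
        rw [List.filter_cons_of_pos (by simp [hs])]
        refine congrArg (k :: ·) (ih (PySem.Set.add t k) (PySem.Set.add s' k) ?_)
        intro x
        rw [pvMem_add, pvMem_add, hmem]
        tauto

-- Key stream of a block of records.
def pvStream (recs : List (List (String × Int))) : List String :=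
  recs.flatMap (fun rec => (PySem.Dict.ofList rec).keys)

lemma pvStream_append (x y : List (List (String × Int))) :
    pvStream (x ++ y) = pvStream x ++ pvStream y := by
  simp [pvStream]

lemma pvMerge_eq (recs : List (List (String × Int))) :
    pvMergeRecs recs = pvPick (pvStream recs) PySem.Set.empty := by
  fun_induction pvMergeRecs recs with
  | case1 => simp [pvStream, pvPick]
  | case2 r =>
    simp only [pvStream, List.flatMap_cons, List.flatMap_nil, List.append_nil]
    exact (pvPick_of_nodup _ _ (PySem.Dict.nodup_keys_ofList r)
      (by simp [PySem.Set.empty])).symm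
  | case3 a b t recs mid left right have_ ihtake ihdrop =>
    show pvMergeRecs ((a :: b :: t).take ((a :: b :: t).length / 2)) ++
        List.filter
          (fun k => !(PySem.Set.contains
            (PySem.Set.ofList (pvMergeRecs ((a :: b :: t).take ((a :: b :: t).length / 2)))) k))
          (pvMergeRecs ((a :: b :: t).drop ((a :: b :: t).length / 2))) =
        pvPick (pvStream (a :: b :: t)) PySem.Set.empty
    rw [ihtake, ihdrop]
    rw [show pvStream (a :: b :: t) =
        pvStream ((a :: b :: t).take ((a :: b :: t).length / 2)) ++
          pvStream ((a :: b :: t).drop ((a :: b :: t).length / 2)) from by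
      rw [← pvStream_append, List.take_append_drop]]
    rw [pvPick_append]
    refine congrArg (pvPick (pvStream ((a :: b :: t).take ((a :: b :: t).length / 2))) PySem.Set.empty ++ ·) ?_
    rw [pvFilterPick (pvStream ((a :: b :: t).drop ((a :: b :: t).length / 2)))
      (PySem.Set.ofList (pvPick (pvStream ((a :: b :: t).take ((a :: b :: t).length / 2))) PySem.Set.empty))
      PySem.Set.empty
      (List.foldl PySem.Set.add PySem.Set.empty (pvStream ((a :: b :: t).take ((a :: b :: t).length / 2))))
      (fun x => by
        rw [pvMem_foldl_add]
        simp [PySem.Set.mem_ofList, pvMem_pick, PySem.Set.empty])]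

-- ===== VERDICT (by name: the statement is the Claim_ definition above) =====
theorem compute_headers_py_spec : Claim_equal_compute_headers_py := by
  intro existing_headers new_records add_missing_columns _
  unfold Spec_compute_headers_py compute_headers_py compute_headers_py_alt
  cases add_missing_columns with
  | false => rfl
  | true =>
    simp only [Bool.not_true, if_true, if_neg (by decide : ¬ (false : Bool) = true)]
    rw [show (fun (st : List String × PySem.Set String) rec =>
        List.foldl
          (fun (st : List String × PySem.Set String) k =>
            if PySem.Set.contains st.2 k then st
            else (st.1 ++ [k], PySem.Set.add st.2 k))
          st ((PySem.Dict.ofList rec).keys)) =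
        (fun st rec => List.foldl pvStep st ((PySem.Dict.ofList rec).keys)) from rfl,
      ← List.foldl_flatMap, pvFoldA]
    rw [pvMerge_eq]
    refine congrArg (existing_headers ++ ·) ?_
    rw [pvFilterPick (pvStream new_records) (PySem.Set.ofList existing_headers)
      PySem.Set.empty (PySem.Set.ofList existing_headers)
      (fun x => by simp [PySem.Set.empty])]
    rfl
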